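-- pv_equiv track=rewrite | github.com/andresculchac/EstructurasDeDatosUnal | semana2/EjercicioPorDef.py | sumasTotales
-- ===== SOURCE A (Python) =====
-- def sumasTotales(list, intIntentos):
--     sumatorias = []
--     jugadores = []
--     so = 0
--     lar = 0
--     iS = 0
--     for i in range(intIntentos):
--         contador = 0
--         for j in range(3):#Son 3 participantes
--             sumaMainTuple = list[j][i]
--             jugadores.append(isPar(sumaMainTuple)) # Agregar la suma de cada columna a la lista
--             contador += sumaMainTuple
--         sumatorias.append(isPar(contador)) # Agregar la suma de cada columna a la lista
--     for i in range(3): # Son 3 participantes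
--         for s in sumatorias:
--             if i == 0:
--                 if jugadores[0] and s:
--                     so += 1
--                 elif jugadores[0] == False and s == False:
--                     so += 1
--             if i == 1:
--                 if jugadores[1] and s:
--                     lar += 1
--                 elif jugadores[1] == False and s == False:
--                     lar += 1
--             if i == 2:
--                 if jugadores[2] and s:
--                     iS += 1
--                 elif jugadores[2] == False and s == False:
--                     iS += 1
--
--     return so, lar, iS
--
-- def isPar(num):
--     if num % 2 == 0:
--         return True
--     else:
--         return False
-- ===== SOURCE B (Python) =====
-- def sumasTotales(list, intIntentos):
--     if intIntentos <= 0: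
--         return (0, 0, 0)
--     j0 = list[0][0] % 2 == 0
--     j1 = list[1][0] % 2 == 0
--     j2 = list[2][0] % 2 == 0
--     t = 0
--     for i in range(intIntentos):
--         if (list[0][i] + list[1][i] + list[2][i]) % 2 == 0:
--             t += 1
--     f = intIntentos - t
--     return (t if j0 else f, t if j1 else f, t if j2 else f)
-- ===== Notes on version B (the rewrite author's own statement) =====
-- stated objective: simpler
-- what changed: Instead of materialising a jugadores list of 3n parities and rescanning the sumatorias list three times with branchy per-element comparisons, B counts even column sums once in a single pass and answers each player with t or n-t depending only on its first value's parity.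
import Mathlib
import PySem

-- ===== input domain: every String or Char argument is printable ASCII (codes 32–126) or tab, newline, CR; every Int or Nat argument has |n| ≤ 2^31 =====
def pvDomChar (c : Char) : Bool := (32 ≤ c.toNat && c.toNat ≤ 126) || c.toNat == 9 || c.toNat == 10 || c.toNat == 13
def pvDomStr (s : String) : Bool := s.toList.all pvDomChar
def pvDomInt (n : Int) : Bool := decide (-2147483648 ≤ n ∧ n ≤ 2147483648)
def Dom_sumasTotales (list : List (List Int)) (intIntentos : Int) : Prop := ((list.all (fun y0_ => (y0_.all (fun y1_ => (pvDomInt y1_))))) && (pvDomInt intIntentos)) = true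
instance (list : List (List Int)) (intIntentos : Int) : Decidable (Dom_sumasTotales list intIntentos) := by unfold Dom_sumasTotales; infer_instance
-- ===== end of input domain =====

-- B replaces A's 3n-element jugadores list and triple rescan of sumatorias by one counting
-- pass over the columns plus three constant-time parity lookups (objective: simpler).

-- ===== PORT A =====
-- isPar(num)
def isParL (num : Int) : Bool := PySem.Int.mod num 2 == 0

-- body of the first 'for i in range(intIntentos)' loop (inner 'for j in range(3)' included);
-- list[j][i] is ported as pyGetD: Pre_ excludes the inputs where Python raises IndexError
def aStep1 (list : List (List Int)) (st : List Bool × List Bool) (i : Int) : List Bool × List Bool :=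
  let inner := (PySem.List.pyRange 0 3 1).foldl
    (fun (p : Int × List Bool) j =>
      let sumaMainTuple := PySem.List.pyGetD (PySem.List.pyGetD list j []) i 0
      (p.1 + sumaMainTuple, p.2 ++ [isParL sumaMainTuple]))
    (0, st.2)
  (st.1 ++ [isParL inner.1], inner.2)

-- body of the second 'for i in range(3)' loop: the inner 'for s in sumatorias' with its
-- three 'if i == k' guarded branch pairs, updating (so, lar, iS)
def aStep2 (jugadores : List Bool) (sumatorias : List Bool) (r : Int × Int × Int) (i : Int) : Int × Int × Int :=
  sumatorias.foldl
    (fun (r : Int × Int × Int) s =>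
      let r := if i == 0 then
          (if PySem.List.pyGetD jugadores 0 false && s then (r.1 + 1, r.2)
           else if PySem.List.pyGetD jugadores 0 false == false && s == false then (r.1 + 1, r.2)
           else r) else r
      let r := if i == 1 then
          (if PySem.List.pyGetD jugadores 1 false && s then (r.1, r.2.1 + 1, r.2.2)
           else if PySem.List.pyGetD jugadores 1 false == false && s == false then (r.1, r.2.1 + 1, r.2.2)
           else r) else r
      let r := if i == 2 then
          (if PySem.List.pyGetD jugadores 2 false && s then (r.1, r.2.1, r.2.2 + 1)
           else if PySem.List.pyGetD jugadores 2 false == false && s == false then (r.1, r.2.1, r.2.2 + 1)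
           else r) else r
      r)
    r

def sumasTotales (list : List (List Int)) (intIntentos : Int) : Int × Int × Int :=
  let st := (PySem.List.pyRange 0 intIntentos 1).foldl (aStep1 list) ([], [])
  (PySem.List.pyRange 0 3 1).foldl (aStep2 st.2 st.1) (0, 0, 0)

-- ===== PORT B =====
def sumasTotales_alt (list : List (List Int)) (intIntentos : Int) : Int × Int × Int :=
  if intIntentos ≤ 0 then (0, 0, 0)
  else
    let j0 := PySem.Int.mod (PySem.List.pyGetD (PySem.List.pyGetD list 0 []) 0 0) 2 == 0
    let j1 := PySem.Int.mod (PySem.List.pyGetD (PySem.List.pyGetD list 1 []) 0 0) 2 == 0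
    let j2 := PySem.Int.mod (PySem.List.pyGetD (PySem.List.pyGetD list 2 []) 0 0) 2 == 0
    let t := (PySem.List.pyRange 0 intIntentos 1).foldl
      (fun (t : Int) i =>
        if PySem.Int.mod (PySem.List.pyGetD (PySem.List.pyGetD list 0 []) i 0
             + PySem.List.pyGetD (PySem.List.pyGetD list 1 []) i 0
             + PySem.List.pyGetD (PySem.List.pyGetD list 2 []) i 0) 2 == 0
        then t + 1 else t)
      0
    let f := intIntentos - t
    ((if j0 then t else f), (if j1 then t else f), (if j2 then t else f))

-- ===== PRECONDITION & SPEC =====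
-- Pre_ excludes exactly the inputs where Python A raises IndexError: a positive intIntentos
-- with fewer than 3 rows, or a row among the first three shorter than intIntentos.
def Pre_sumasTotales (list : List (List Int)) (intIntentos : Int) : Prop :=
  intIntentos ≤ 0 ∨
    (3 ≤ list.length ∧
     intIntentos ≤ ((list.getD 0 []).length : Int) ∧
     intIntentos ≤ ((list.getD 1 []).length : Int) ∧
     intIntentos ≤ ((list.getD 2 []).length : Int))
instance (list : List (List Int)) (intIntentos : Int) : Decidable (Pre_sumasTotales list intIntentos) := by unfold Pre_sumasTotales; infer_instance

def pvWitness_sumasTotales : List (List Int) × Int := ([[1, 2], [3, 4], [5, 6]], 2)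

def Spec_sumasTotales (list : List (List Int)) (intIntentos : Int) (out : Int × Int × Int) : Prop := out = sumasTotales_alt list intIntentos
instance (list : List (List Int)) (intIntentos : Int) (out : Int × Int × Int) : Decidable (Spec_sumasTotales list intIntentos out) := by unfold Spec_sumasTotales; infer_instance

-- ===== CLAIM (what is proved, stated in full; the proofs are below) =====
def Claim_equal_sumasTotales : Prop := ∀ (list : List (List Int)) (intIntentos : Int), Dom_sumasTotales list intIntentos → Pre_sumasTotales list intIntentos → Spec_sumasTotales list intIntentos (sumasTotales list intIntentos)

-- ===== LEMMAS AND PROOFS =====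

-- proof-only abbreviations
def gEl (list : List (List Int)) (j i : Int) : Int := PySem.List.pyGetD (PySem.List.pyGetD list j []) i 0
def colPar (list : List (List Int)) (i : Int) : Bool := isParL (gEl list 0 i + gEl list 1 i + gEl list 2 i)
def cnt (b : Bool) (S : List Bool) : Int := (S.count b : Int)

theorem aStep1_eq (list : List (List Int)) (st : List Bool × List Bool) (i : Int) :
    aStep1 list st i =
      (st.1 ++ [colPar list i],
       st.2 ++ [isParL (gEl list 0 i), isParL (gEl list 1 i), isParL (gEl list 2 i)]) := by
  have h3 : PySem.List.pyRange 0 3 1 = [0, 1, 2] := by decide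
  simp [aStep1, h3, List.foldl, colPar, gEl]

theorem loop1_eq (list : List (List Int)) :
    ∀ (L : List Int) (s j : List Bool),
      L.foldl (aStep1 list) (s, j) =
        (s ++ L.map (colPar list),
         j ++ L.flatMap (fun i => [isParL (gEl list 0 i), isParL (gEl list 1 i), isParL (gEl list 2 i)])) := by
  intro L
  induction L with
  | nil => intro s j; simp
  | cons x L ih =>
      intro s j
      simp [List.foldl_cons, aStep1_eq, ih]

theorem cnt_nil (b : Bool) : cnt b [] = 0 := by simp [cnt]

theorem cnt_cons (b s : Bool) (S : List Bool) :
    cnt b (s :: S) = (if s == b then 1 else 0) + cnt b S := by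
  simp only [cnt, List.count_cons]
  split_ifs <;> push_cast <;> omega

theorem aStep2_zero (jug : List Bool) :
    ∀ (S : List Bool) (r : Int × Int × Int),
      aStep2 jug S r 0 = (r.1 + cnt (PySem.List.pyGetD jug 0 false) S, r.2.1, r.2.2) := by
  intro S
  induction S with
  | nil => intro r; simp [aStep2, cnt_nil]
  | cons s S ih =>
      intro r
      have hstep : ∀ r' : Int × Int × Int, aStep2 jug (s :: S) r' 0 =
          aStep2 jug S (if s == PySem.List.pyGetD jug 0 false then (r'.1 + 1, r'.2) else r') 0 := by
        intro r'
        simp only [aStep2, List.foldl_cons]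
        congr 1
        cases h0 : PySem.List.pyGetD jug 0 false <;> cases s <;> simp
      rw [hstep, ih, cnt_cons]
      split_ifs <;> simp <;> omega

theorem aStep2_one (jug : List Bool) :
    ∀ (S : List Bool) (r : Int × Int × Int),
      aStep2 jug S r 1 = (r.1, r.2.1 + cnt (PySem.List.pyGetD jug 1 false) S, r.2.2) := by
  intro S
  induction S with
  | nil => intro r; simp [aStep2, cnt_nil]
  | cons s S ih =>
      intro r
      have hstep : ∀ r' : Int × Int × Int, aStep2 jug (s :: S) r' 1 =
          aStep2 jug S (if s == PySem.List.pyGetD jug 1 false then (r'.1, r'.2.1 + 1, r'.2.2) else r') 1 := by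
        intro r'
        simp only [aStep2, List.foldl_cons]
        congr 1
        cases h0 : PySem.List.pyGetD jug 1 false <;> cases s <;> simp
      rw [hstep, ih, cnt_cons]
      split_ifs <;> simp <;> omega

theorem aStep2_two (jug : List Bool) :
    ∀ (S : List Bool) (r : Int × Int × Int),
      aStep2 jug S r 2 = (r.1, r.2.1, r.2.2 + cnt (PySem.List.pyGetD jug 2 false) S) := by
  intro S
  induction S with
  | nil => intro r; simp [aStep2, cnt_nil]
  | cons s S ih =>
      intro r
      have hstep : ∀ r' : Int × Int × Int, aStep2 jug (s :: S) r' 2 =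
          aStep2 jug S (if s == PySem.List.pyGetD jug 2 false then (r'.1, r'.2.1, r'.2.2 + 1) else r') 2 := by
        intro r'
        simp only [aStep2, List.foldl_cons]
        congr 1
        cases h0 : PySem.List.pyGetD jug 2 false <;> cases s <;> simp
      rw [hstep, ih, cnt_cons]
      split_ifs <;> simp <;> omega

-- A = the three agreement counts of jugadores[k] against sumatorias
theorem sumasTotales_eq_counts (list : List (List Int)) (intIntentos : Int) :
    sumasTotales list intIntentos =
      (cnt (PySem.List.pyGetD ((PySem.List.pyRange 0 intIntentos 1).flatMap
              (fun i => [isParL (gEl list 0 i), isParL (gEl list 1 i), isParL (gEl list 2 i)])) 0 false)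
           ((PySem.List.pyRange 0 intIntentos 1).map (colPar list)),
       cnt (PySem.List.pyGetD ((PySem.List.pyRange 0 intIntentos 1).flatMap
              (fun i => [isParL (gEl list 0 i), isParL (gEl list 1 i), isParL (gEl list 2 i)])) 1 false)
           ((PySem.List.pyRange 0 intIntentos 1).map (colPar list)),
       cnt (PySem.List.pyGetD ((PySem.List.pyRange 0 intIntentos 1).flatMap
              (fun i => [isParL (gEl list 0 i), isParL (gEl list 1 i), isParL (gEl list 2 i)])) 2 false)
           ((PySem.List.pyRange 0 intIntentos 1).map (colPar list))) := by
  have h3 : PySem.List.pyRange 0 3 1 = [0, 1, 2] := by decide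
  simp only [sumasTotales, loop1_eq, List.nil_append, h3, List.foldl_cons, List.foldl_nil,
    aStep2_zero, aStep2_one, aStep2_two]
  simp

-- B's counting loop adds the number of even column sums
theorem tLoop_eq_colPar (list : List (List Int)) :
    ∀ (L : List Int) (t : Int),
      L.foldl (fun (t : Int) i => if colPar list i then t + 1 else t) t
        = t + cnt true (L.map (colPar list)) := by
  intro L
  induction L with
  | nil => intro t; simp [cnt_nil]
  | cons x L ih =>
      intro t
      simp only [List.foldl_cons, List.map_cons, cnt_cons, ih]
      cases h : colPar list x <;> simp only [h, Bool.false_eq_true, if_false, if_true,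
        BEq.rfl, beq_iff_eq] <;> omega

theorem tLoop_eq (list : List (List Int)) (L : List Int) (t : Int) :
      L.foldl
        (fun (t : Int) i =>
          if PySem.Int.mod (PySem.List.pyGetD (PySem.List.pyGetD list 0 []) i 0
               + PySem.List.pyGetD (PySem.List.pyGetD list 1 []) i 0
               + PySem.List.pyGetD (PySem.List.pyGetD list 2 []) i 0) 2 == 0
          then t + 1 else t) t
      = t + cnt true (L.map (colPar list)) :=
  tLoop_eq_colPar list L t

theorem cnt_false_eq (S : List Bool) : cnt false S = (S.length : Int) - cnt true S := by
  induction S with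
  | nil => simp [cnt_nil]
  | cons s S ih => cases s <;> simp [cnt_cons, ih] <;> omega

-- ===== VERDICT (by name: the statement is the Claim_ definition above) =====
theorem sumasTotales_spec : Claim_equal_sumasTotales := by
  intro list intIntentos _dom _pre
  unfold Spec_sumasTotales
  rw [sumasTotales_eq_counts]
  by_cases hn : intIntentos ≤ 0
  · rw [PySem.List.pyRange_one_eq_nil (by omega)]
    simp [sumasTotales_alt, hn, cnt_nil]
  · rw [not_le] at hn
    have hle : ¬ intIntentos ≤ 0 := by omega
    have hc : PySem.List.pyRange 0 intIntentos 1 = 0 :: PySem.List.pyRange 1 intIntentos 1 :=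
      PySem.List.pyRange_one_cons hn
    have hj0 : PySem.List.pyGetD ((PySem.List.pyRange 0 intIntentos 1).flatMap
        (fun i => [isParL (gEl list 0 i), isParL (gEl list 1 i), isParL (gEl list 2 i)])) 0 false
        = isParL (gEl list 0 0) := by
      rw [hc]; simp [PySem.List.pyGetD_ofNat']
    have hj1 : PySem.List.pyGetD ((PySem.List.pyRange 0 intIntentos 1).flatMap
        (fun i => [isParL (gEl list 0 i), isParL (gEl list 1 i), isParL (gEl list 2 i)])) 1 false
        = isParL (gEl list 1 0) := by
      rw [hc]; simp [PySem.List.pyGetD_ofNat']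
    have hj2 : PySem.List.pyGetD ((PySem.List.pyRange 0 intIntentos 1).flatMap
        (fun i => [isParL (gEl list 0 i), isParL (gEl list 1 i), isParL (gEl list 2 i)])) 2 false
        = isParL (gEl list 2 0) := by
      rw [hc]; simp [PySem.List.pyGetD_ofNat']
    rw [hj0, hj1, hj2]
    have hlen : (((PySem.List.pyRange 0 intIntentos 1).map (colPar list)).length : Int)
        = intIntentos := by
      simp only [List.length_map, PySem.List.length_pyRange_one]
      omega
    simp only [sumasTotales_alt, hle, if_false]
    rw [tLoop_eq]
    refine Prod.ext ?_ (Prod.ext ?_ ?_)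
    · cases hb : isParL (gEl list 0 0) <;> simp only [isParL, gEl] at hb <;>
        simp only [hb, Bool.false_eq_true, if_false, if_true, cnt_false_eq, hlen] <;> omega
    · cases hb : isParL (gEl list 1 0) <;> simp only [isParL, gEl] at hb <;>
        simp only [hb, Bool.false_eq_true, if_false, if_true, cnt_false_eq, hlen] <;> omega
    · cases hb : isParL (gEl list 2 0) <;> simp only [isParL, gEl] at hb <;>
        simp only [hb, Bool.false_eq_true, if_false, if_true, cnt_false_eq, hlen] <;> omega
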